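-- pv_equiv track=rewrite | github.com/krisx303/algorithms-data-structures | zadania z bit/bit 3/7_paczka_mentosow.py | mentosy
-- ===== SOURCE A (Python) =====
-- def mentosy(T: list[int]) -> int:
--     n = len(T)
--     F = [[0 for _ in range(n)] for _ in range(n)]
--
--     def f(i:int, j:int) -> int:
--         if i > j or i > n-1 or j < 0:
--             return 0
--         if i == j:
--             return T[i]
--         if F[i][j] != 0:
--             return F[i][j]
--         F[i][j] = max(min(f(i+2, j), f(i+1, j-1)) + T[i],
--                       min(f(i+1, j-1), f(i, j-2)) + T[j])
--         return F[i][j]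
--
--     f(0, n-1)
--     return F[0][n-1]
-- ===== SOURCE B (Python) =====
-- def mentosy(T: list[int]) -> int:
--     n = len(T)
--     F = [[0] * n for _ in range(n)]
--
--     def g(a: int, b: int) -> int:
--         if a > b or a > n - 1 or b < 0:
--             return 0
--         if a == b:
--             return T[a]
--         return F[a][b]
--
--     for d in range(1, n):
--         for i in range(n - d):
--             j = i + d
--             F[i][j] = max(min(g(i + 2, j), g(i + 1, j - 1)) + T[i],
--                           min(g(i + 1, j - 1), g(i, j - 2)) + T[j])
--     return F[0][n - 1]
-- ===== Notes on version B (the rewrite author's own statement) =====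
-- stated objective: alternative
-- what changed: Replaced A's memoized top-down recursion (with a closure mutating a memo table and a 0-means-unmemoized check) by a bottom-up iterative interval DP that fills the table by increasing gap length; same O(n^2) table, no recursion.
import Mathlib
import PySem

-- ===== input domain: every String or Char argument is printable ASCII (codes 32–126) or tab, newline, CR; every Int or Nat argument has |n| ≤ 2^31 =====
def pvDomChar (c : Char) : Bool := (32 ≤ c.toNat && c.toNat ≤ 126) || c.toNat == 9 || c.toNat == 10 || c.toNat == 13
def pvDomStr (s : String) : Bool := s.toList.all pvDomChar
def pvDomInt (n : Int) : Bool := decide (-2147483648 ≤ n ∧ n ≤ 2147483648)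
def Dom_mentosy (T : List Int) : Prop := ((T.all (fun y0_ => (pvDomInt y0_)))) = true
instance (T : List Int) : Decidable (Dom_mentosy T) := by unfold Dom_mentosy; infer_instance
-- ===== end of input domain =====

-- B replaces A's memoized top-down recursion by a bottom-up iterative gap-order interval DP
-- over the same n×n table (objective: alternative decomposition, same value everywhere A returns).


-- ===== PORT A =====
-- shared table accessors: Python's F[i][j] read / F[i][j] = v write; every access both
-- programs perform is at indices 0 ≤ i,j < n, where getD/set are exact.
def pvTget (F : List (List Int)) (i j : Int) : Int :=
  (F.getD i.toNat []).getD j.toNat 0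

def pvTset (F : List (List Int)) (i j : Int) (v : Int) : List (List Int) :=
  F.set i.toNat ((F.getD i.toNat []).set j.toNat v)

-- A's inner closure f, with the mutated memo table F threaded as state; the four recursive
-- calls appear in Python's evaluation order.
def mentosyF (n : Int) (T : List Int) (F : List (List Int)) (i j : Int) :
    Int × List (List Int) :=
  if h1 : i > j ∨ i > n - 1 ∨ j < 0 then (0, F)
  else if h2 : i = j then (T.getD i.toNat 0, F)
  else if pvTget F i j ≠ 0 then (pvTget F i j, F)
  else
    let p1 := mentosyF n T F (i + 2) j
    let p2 := mentosyF n T p1.2 (i + 1) (j - 1)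
    let p3 := mentosyF n T p2.2 (i + 1) (j - 1)
    let p4 := mentosyF n T p3.2 i (j - 2)
    let v := max (min p1.1 p2.1 + T.getD i.toNat 0) (min p3.1 p4.1 + T.getD j.toNat 0)
    (v, pvTset p4.2 i j v)
termination_by (j - i).toNat
decreasing_by all_goals omega

def mentosy (T : List Int) : Int :=
  let n : Int := T.length
  let F0 : List (List Int) := List.replicate T.length (List.replicate T.length 0)
  let F := (mentosyF n T F0 0 (n - 1)).2
  pvTget F 0 (n - 1)

-- ===== PORT B =====
-- B's read helper g: 0 outside the triangle, T[a] on the diagonal, else the filled cell.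
def mentosyG (n : Int) (T : List Int) (F : List (List Int)) (a b : Int) : Int :=
  if a > b ∨ a > n - 1 ∨ b < 0 then 0
  else if a = b then T.getD a.toNat 0
  else pvTget F a b

def mentosyCell (n : Int) (T : List Int) (F : List (List Int)) (i j : Int) : Int :=
  max (min (mentosyG n T F (i + 2) j) (mentosyG n T F (i + 1) (j - 1)) + T.getD i.toNat 0)
      (min (mentosyG n T F (i + 1) (j - 1)) (mentosyG n T F i (j - 2)) + T.getD j.toNat 0)

def mentosy_alt (T : List Int) : Int :=
  let n : Int := T.length
  let F0 : List (List Int) := List.replicate T.length (List.replicate T.length 0)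
  let F := (PySem.List.pyRange 1 n 1).foldl (fun F d =>
      (PySem.List.pyRange 0 (n - d) 1).foldl (fun F i =>
        pvTset F i (i + d) (mentosyCell n T F i (i + d))) F) F0
  pvTget F 0 (n - 1)

-- ===== PRECONDITION & SPEC =====
-- Pre_ excludes only the empty list, on which A raises IndexError (F[0][-1] on an empty F).
def Pre_mentosy (T : List Int) : Prop := T ≠ []
instance (T : List Int) : Decidable (Pre_mentosy T) := by unfold Pre_mentosy; infer_instance

def pvWitness_mentosy : List Int := [3, 1, 2]

def Spec_mentosy (T : List Int) (out : Int) : Prop := out = mentosy_alt T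
instance (T : List Int) (out : Int) : Decidable (Spec_mentosy T out) := by
  unfold Spec_mentosy; infer_instance

-- ===== CLAIM (what is proved, stated in full; the proofs are below) =====
def Claim_equal_mentosy : Prop :=
  ∀ (T : List Int), Dom_mentosy T → Pre_mentosy T → Spec_mentosy T (mentosy T)

-- ===== LEMMAS AND PROOFS =====

-- The pure value of the interval recurrence; both ports' tables hold these values.
def gp (n : Int) (T : List Int) (i j : Int) : Int :=
  if h1 : i > j ∨ i > n - 1 ∨ j < 0 then 0
  else if h2 : i = j then T.getD i.toNat 0
  else max (min (gp n T (i + 2) j) (gp n T (i + 1) (j - 1)) + T.getD i.toNat 0)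
           (min (gp n T (i + 1) (j - 1)) (gp n T i (j - 2)) + T.getD j.toNat 0)
termination_by (j - i).toNat
decreasing_by all_goals omega

def Dims (m : Nat) (F : List (List Int)) : Prop :=
  F.length = m ∧ ∀ r ∈ F, r.length = m

theorem getD_set_self_l {α : Type} (l : List α) (k : Nat) (r d : α) (h : k < l.length) :
    (l.set k r).getD k d = r := by
  rw [List.getD_eq_getElem?_getD, List.getElem?_set_self h]; rfl

theorem getD_set_ne_l {α : Type} (l : List α) (k k' : Nat) (r d : α) (h : k ≠ k') :
    (l.set k r).getD k' d = l.getD k' d := by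
  rw [List.getD_eq_getElem?_getD, List.getElem?_set_ne h, ← List.getD_eq_getElem?_getD]

theorem dims_tset {m : Nat} {F : List (List Int)} (h : Dims m F) (i j : Int) (v : Int) :
    Dims m (pvTset F i j v) := by
  obtain ⟨hl, hr⟩ := h
  unfold pvTset
  by_cases hin : i.toNat < F.length
  · refine ⟨by simp [hl], ?_⟩
    intro r hrmem
    rcases List.mem_or_eq_of_mem_set hrmem with hmem | heq
    · exact hr r hmem
    · subst heq
      rw [List.length_set]
      have : F.getD i.toNat [] = F[i.toNat] := by
        simp [List.getD_eq_getElem?_getD, List.getElem?_eq_getElem hin]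
      rw [this]
      exact hr _ (List.getElem_mem hin)
  · rw [List.set_eq_of_length_le (by omega)]
    exact ⟨hl, hr⟩

theorem tget_tset_self {m : Nat} {F : List (List Int)} (h : Dims m F) {i j : Int}
    (hi0 : 0 ≤ i) (hi : i < (m : Int)) (hj0 : 0 ≤ j) (hj : j < (m : Int)) (v : Int) :
    pvTget (pvTset F i j v) i j = v := by
  obtain ⟨hl, hr⟩ := h
  have hiF : i.toNat < F.length := by omega
  have hrow : F.getD i.toNat [] = F[i.toNat] := by
    simp [List.getD_eq_getElem?_getD, List.getElem?_eq_getElem hiF]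
  have hrlen : (F.getD i.toNat []).length = m := by
    rw [hrow]; exact hr _ (List.getElem_mem hiF)
  unfold pvTget pvTset
  rw [getD_set_self_l _ _ _ _ hiF, getD_set_self_l _ _ _ _ (by omega)]

theorem tget_tset_ne {F : List (List Int)} {i j a b : Int}
    (hi0 : 0 ≤ i) (hj0 : 0 ≤ j) (ha0 : 0 ≤ a) (hb0 : 0 ≤ b)
    (hne : a ≠ i ∨ b ≠ j) (v : Int) :
    pvTget (pvTset F i j v) a b = pvTget F a b := by
  unfold pvTget pvTset
  by_cases hiF : i.toNat < F.length
  · by_cases hai : a.toNat = i.toNat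
    · have hbj : b.toNat ≠ j.toNat := by
        rcases hne with h | h
        · exact absurd (by omega : a = i) h
        · omega
      rw [hai, getD_set_self_l _ _ _ _ hiF, getD_set_ne_l _ _ _ _ _ (by omega : j.toNat ≠ b.toNat)]
    · rw [getD_set_ne_l _ _ _ _ _ (by omega : i.toNat ≠ a.toNat)]
  · rw [List.set_eq_of_length_le (by omega)]

theorem tget_replicate (m : Nat) (a b : Int) :
    pvTget (List.replicate m (List.replicate m 0)) a b = 0 := by
  unfold pvTget
  by_cases ha : a.toNat < m
  · rw [List.getD_replicate _ ha]
    by_cases hb : b.toNat < m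
    · rw [List.getD_replicate _ hb]
    · rw [List.getD_eq_default _ _ (by simpa using hb)]
  · have h0 : (List.replicate m (List.replicate m (0:Int))).getD a.toNat [] = [] :=
      List.getD_eq_default _ _ (by simpa using ha)
    rw [h0]
    simp [List.getD]

-- memo-table invariant for A: every nonzero stored entry is the pure value
def InvA (n : Int) (T : List Int) (F : List (List Int)) : Prop :=
  ∀ a b : Int, 0 ≤ a → a < n → 0 ≤ b → b < n →
    pvTget F a b ≠ 0 → pvTget F a b = gp n T a b

theorem mentosyF_spec (T : List Int) (i j : Int) (F : List (List Int))
    (hd : Dims T.length F) (hinv : InvA (T.length : Int) T F)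
    (hi : 0 ≤ i) (hj : j ≤ (T.length : Int) - 1) :
    (mentosyF (T.length : Int) T F i j).1 = gp (T.length : Int) T i j ∧
    Dims T.length (mentosyF (T.length : Int) T F i j).2 ∧
    InvA (T.length : Int) T (mentosyF (T.length : Int) T F i j).2 ∧
    (i < j → pvTget (mentosyF (T.length : Int) T F i j).2 i j = gp (T.length : Int) T i j) := by
  by_cases h1 : i > j ∨ i > (T.length : Int) - 1 ∨ j < 0
  · rw [mentosyF, gp]
    simp only [dif_pos h1]
    exact ⟨trivial, hd, hinv, fun hij => absurd hij (by omega)⟩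
  · by_cases h2 : i = j
    · rw [mentosyF, gp]
      simp only [dif_neg h1, dif_pos h2]
      exact ⟨trivial, hd, hinv, fun hij => absurd hij (by omega)⟩
    · have hij : i < j := by omega
      have hin : i < (T.length : Int) := by omega
      have hjn : j < (T.length : Int) := by omega
      by_cases h3 : pvTget F i j ≠ 0
      · rw [mentosyF]
        simp only [dif_neg h1, dif_neg h2, if_pos h3]
        have hv := hinv i j hi hin (by omega) hjn h3
        exact ⟨hv, hd, hinv, fun _ => hv⟩
      · obtain ⟨e1, d1, v1, _⟩ := mentosyF_spec T (i + 2) j F hd hinv (by omega) hj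
        obtain ⟨e2, d2, v2, _⟩ := mentosyF_spec T (i + 1) (j - 1)
          (mentosyF (T.length : Int) T F (i + 2) j).2 d1 v1 (by omega) (by omega)
        obtain ⟨e3, d3, v3, _⟩ := mentosyF_spec T (i + 1) (j - 1)
          (mentosyF (T.length : Int) T (mentosyF (T.length : Int) T F (i + 2) j).2
            (i + 1) (j - 1)).2 d2 v2 (by omega) (by omega)
        obtain ⟨e4, d4, v4, _⟩ := mentosyF_spec T i (j - 2)
          (mentosyF (T.length : Int) T (mentosyF (T.length : Int) T
            (mentosyF (T.length : Int) T F (i + 2) j).2 (i + 1) (j - 1)).2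
            (i + 1) (j - 1)).2 d3 v3 (by omega) (by omega)
        rw [mentosyF]
        simp only [dif_neg h1, dif_neg h2, if_neg h3]
        rw [e1, e2, e3, e4]
        have hgp : max (min (gp (T.length : Int) T (i + 2) j) (gp (T.length : Int) T (i + 1) (j - 1))
              + T.getD i.toNat 0)
            (min (gp (T.length : Int) T (i + 1) (j - 1)) (gp (T.length : Int) T i (j - 2))
              + T.getD j.toNat 0) = gp (T.length : Int) T i j := by
          conv_rhs => rw [gp]
          rw [dif_neg h1, dif_neg h2]
        refine ⟨hgp, dims_tset d4 _ _ _, ?_, fun _ => ?_⟩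
        · intro a b ha0 han hb0 hbn hne
          by_cases hab : a = i ∧ b = j
          · rw [hab.1, hab.2, tget_tset_self d4 hi hin (by omega) hjn]
            exact hgp
          · have hne' : a ≠ i ∨ b ≠ j := by tauto
            rw [tget_tset_ne hi (by omega) ha0 hb0 hne'] at hne ⊢
            exact v4 a b ha0 han hb0 hbn hne
        · rw [tget_tset_self d4 hi hin (by omega) hjn]
          exact hgp
termination_by (j - i).toNat
decreasing_by all_goals omega

-- partial-fill invariant for B: every in-range cell of gap at most d is the pure value
def Low (n : Int) (T : List Int) (d : Int) (F : List (List Int)) : Prop :=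
  ∀ a b : Int, 0 ≤ a → a < b → b ≤ n - 1 → b - a ≤ d → pvTget F a b = gp n T a b

theorem mentosyG_eq (T : List Int) (d : Int) (F : List (List Int))
    (hF : Low (T.length : Int) T d F) (a b : Int)
    (ha : 0 ≤ a) (hb : b ≤ (T.length : Int) - 1) (hgap : b - a ≤ d) :
    mentosyG (T.length : Int) T F a b = gp (T.length : Int) T a b := by
  unfold mentosyG
  by_cases h1 : a > b ∨ a > (T.length : Int) - 1 ∨ b < 0
  · rw [if_pos h1]
    conv_rhs => rw [gp]
    rw [dif_pos h1]
  · rw [if_neg h1]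
    by_cases h2 : a = b
    · rw [if_pos h2]
      conv_rhs => rw [gp]
      rw [dif_neg h1, dif_pos h2]
    · rw [if_neg h2, hF a b ha (by omega) hb hgap]

theorem mentosyCell_eq (T : List Int) (d : Int) (hd : 1 ≤ d) (F : List (List Int))
    (hF : Low (T.length : Int) T (d - 2) F) (i : Int)
    (hi : 0 ≤ i) (hij : i + d ≤ (T.length : Int) - 1) :
    mentosyCell (T.length : Int) T F i (i + d) = gp (T.length : Int) T i (i + d) := by
  have hF' : Low (T.length : Int) T (d - 2) F := hF
  unfold mentosyCell
  rw [mentosyG_eq T (d - 2) F hF' (i + 2) (i + d) (by omega) hij (by omega),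
      mentosyG_eq T (d - 2) F hF' (i + 1) (i + d - 1) (by omega) (by omega) (by omega),
      mentosyG_eq T (d - 2) F hF' i (i + d - 2) (by omega) (by omega) (by omega)]
  conv_rhs => rw [gp]
  rw [dif_neg (by omega), dif_neg (by omega)]

theorem inner_spec (T : List Int) (d : Int) (hd : 1 ≤ d) (i0 : Int) (h0 : 0 ≤ i0)
    (F : List (List Int)) (hdims : Dims T.length F)
    (hlow : Low (T.length : Int) T (d - 1) F)
    (hdone : ∀ a : Int, 0 ≤ a → a < i0 →
      pvTget F a (a + d) = gp (T.length : Int) T a (a + d)) :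
    Dims T.length ((PySem.List.pyRange i0 ((T.length : Int) - d) 1).foldl
        (fun F i => pvTset F i (i + d) (mentosyCell (T.length : Int) T F i (i + d))) F) ∧
    Low (T.length : Int) T d ((PySem.List.pyRange i0 ((T.length : Int) - d) 1).foldl
        (fun F i => pvTset F i (i + d) (mentosyCell (T.length : Int) T F i (i + d))) F) := by
  by_cases hlt : i0 < (T.length : Int) - d
  · rw [PySem.List.pyRange_one_cons hlt, List.foldl_cons]
    have hcell : mentosyCell (T.length : Int) T F i0 (i0 + d) =
        gp (T.length : Int) T i0 (i0 + d) :=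
      mentosyCell_eq T d hd F
        (fun a b ha hab hb hg => hlow a b ha hab hb (by omega)) i0 h0 (by omega)
    refine inner_spec T d hd (i0 + 1) (by omega) _ (dims_tset hdims _ _ _) ?_ ?_
    · intro a b ha hab hb hg
      rw [tget_tset_ne h0 (by omega) ha (by omega) (by omega) _]
      exact hlow a b ha hab hb hg
    · intro a ha halt
      by_cases hai : a = i0
      · rw [hai, tget_tset_self hdims h0 (by omega) (by omega) (by omega), hcell]
      · rw [tget_tset_ne h0 (by omega) ha (by omega) (Or.inl hai) _]
        exact hdone a ha (by omega)
  · have hnil : PySem.List.pyRange i0 ((T.length : Int) - d) 1 = [] := by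
      rw [PySem.List.pyRange_one]
      have h0' : ((T.length : Int) - d - i0).toNat = 0 := by omega
      rw [h0']
      rfl
    rw [hnil, List.foldl_nil]
    refine ⟨hdims, ?_⟩
    intro a b ha hab hb hg
    by_cases hgap : b - a ≤ d - 1
    · exact hlow a b ha hab hb hgap
    · have hb' : b = a + d := by omega
      rw [hb']
      exact hdone a ha (by omega)
termination_by ((T.length : Int) - d - i0).toNat
decreasing_by all_goals omega

theorem outer_spec (T : List Int) (d0 : Int) (h1 : 1 ≤ d0) (F : List (List Int))
    (hdims : Dims T.length F) (hlow : Low (T.length : Int) T (d0 - 1) F) :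
    Low (T.length : Int) T ((T.length : Int) - 1)
      ((PySem.List.pyRange d0 (T.length : Int) 1).foldl (fun F d =>
        (PySem.List.pyRange 0 ((T.length : Int) - d) 1).foldl
          (fun F i => pvTset F i (i + d) (mentosyCell (T.length : Int) T F i (i + d))) F) F) := by
  by_cases hlt : d0 < (T.length : Int)
  · rw [PySem.List.pyRange_one_cons hlt, List.foldl_cons]
    obtain ⟨hd1, hl1⟩ := inner_spec T d0 h1 0 le_rfl F hdims hlow
      (fun a ha halt => absurd halt (by omega))
    refine outer_spec T (d0 + 1) (by omega) _ hd1 ?_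
    have heq : d0 + 1 - 1 = d0 := by omega
    rw [heq]
    exact hl1
  · have hnil : PySem.List.pyRange d0 (T.length : Int) 1 = [] := by
      rw [PySem.List.pyRange_one]
      have h0' : ((T.length : Int) - d0).toNat = 0 := by omega
      rw [h0']
      rfl
    rw [hnil, List.foldl_nil]
    intro a b ha hab hb hg
    exact hlow a b ha hab hb (by omega)
termination_by ((T.length : Int) - d0).toNat
decreasing_by all_goals omega

-- ===== VERDICT (by name: the statement is the Claim_ definition above) =====
theorem mentosy_spec : Claim_equal_mentosy := by
  intro T _ hpre
  unfold Spec_mentosy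
  have hm : 0 < T.length := by
    cases T with
    | nil => exact absurd rfl hpre
    | cons x xs => simp
  have hdims : Dims T.length (List.replicate T.length (List.replicate T.length (0 : Int))) := by
    refine ⟨by simp, ?_⟩
    intro r hr
    rw [List.eq_of_mem_replicate hr]
    simp
  have hinv0 : InvA (T.length : Int) T
      (List.replicate T.length (List.replicate T.length (0 : Int))) := by
    intro a b _ _ _ _ hne
    exact absurd (tget_replicate T.length a b) hne
  have hlow0 : Low (T.length : Int) T 0
      (List.replicate T.length (List.replicate T.length (0 : Int))) := by
    intro a b ha hab hb hg
    exact absurd hab (by omega)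
  simp only [mentosy, mentosy_alt]
  by_cases h1 : T.length = 1
  · rw [h1]
    have hA : mentosyF ((1 : Nat) : Int) T
        (List.replicate 1 (List.replicate 1 (0 : Int))) 0 (((1 : Nat) : Int) - 1) =
        (T.getD 0 0, List.replicate 1 (List.replicate 1 (0 : Int))) := by
      rw [mentosyF]
      norm_num
    rw [hA]
    have hB : PySem.List.pyRange 1 ((1 : Nat) : Int) 1 = [] := by
      rw [PySem.List.pyRange_one]
      norm_num
    rw [hB, List.foldl_nil]
  · have h2 : 2 ≤ T.length := by omega
    have hA := mentosyF_spec T 0 ((T.length : Int) - 1)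
      (List.replicate T.length (List.replicate T.length (0 : Int))) hdims hinv0 le_rfl le_rfl
    rw [hA.2.2.2 (by omega)]
    have hB := outer_spec T 1 le_rfl
      (List.replicate T.length (List.replicate T.length (0 : Int))) hdims
      (by intro a b ha hab hb hg; exact absurd hab (by omega))
    rw [hB 0 ((T.length : Int) - 1) le_rfl (by omega) le_rfl (by omega)]
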